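-- pv_equiv track=rewrite | github.com/Trujillofa/depotru_database | scripts/utils/autoresearch_to_vanna.py | _insert_before_tail
-- ===== SOURCE A (Python) =====
-- def _insert_before_tail(sql: str, fragment: str) -> str:
--     lower = sql.lower()
--     positions = [
--         p
--         for p in (
--             lower.find(" group by "),
--             lower.find(" order by "),
--             lower.find(" having "),
--             lower.find(" limit "),
--         )
--         if p != -1
--     ]
--     insert_at = min(positions) if positions else len(sql)
--     head = sql[:insert_at].rstrip()
--     tail = sql[insert_at:]
--     if head.endswith(";"):
--         head = head[:-1].rstrip()
--     return f"{head} {fragment}{tail}"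
-- ===== SOURCE B (Python) =====
-- def _insert_before_tail(sql: str, fragment: str) -> str:
--     lower = sql.lower()
--     keywords = (" group by ", " order by ", " having ", " limit ")
--     i = 0
--     n = len(lower)
--     while i < n and not any(lower.startswith(k, i) for k in keywords):
--         i += 1
--     head = sql[:i].rstrip()
--     tail = sql[i:]
--     if head.endswith(";"):
--         head = head[:-1].rstrip()
--     return f"{head} {fragment}{tail}"
-- ===== Notes on version B (the rewrite author's own statement) =====
-- stated objective: alternative
-- what changed: Replaces the four independent full-string find() scans plus a min() over their hits with one left-to-right scan that stops at the first position where any of the four keywords starts; the tail assembly (rstrip, trailing ';' removal, f-string) is unchanged.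
import Mathlib
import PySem

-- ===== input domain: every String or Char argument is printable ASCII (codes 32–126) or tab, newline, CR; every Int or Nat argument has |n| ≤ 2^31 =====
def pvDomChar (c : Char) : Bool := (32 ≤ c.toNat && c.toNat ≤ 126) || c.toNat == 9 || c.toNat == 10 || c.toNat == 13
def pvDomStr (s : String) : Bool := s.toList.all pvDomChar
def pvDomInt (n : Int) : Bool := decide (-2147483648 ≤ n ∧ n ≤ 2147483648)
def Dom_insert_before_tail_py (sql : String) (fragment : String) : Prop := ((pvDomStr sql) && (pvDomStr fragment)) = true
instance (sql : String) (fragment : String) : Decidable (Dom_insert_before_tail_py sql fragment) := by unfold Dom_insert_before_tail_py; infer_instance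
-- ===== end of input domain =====

-- B replaces the four full-string find() scans plus min() with one left-to-right scan that
-- stops at the first position where any of the four keywords starts (alternative, same cost).

-- ===== PORT A =====
def insert_before_tail_py (sql : String) (fragment : String) : String :=
  let s := sql.toList
  let lower := PySem.Chars.lower s
  let positions :=
    [PySem.Chars.find lower " group by ".toList,
     PySem.Chars.find lower " order by ".toList,
     PySem.Chars.find lower " having ".toList,
     PySem.Chars.find lower " limit ".toList].filter (fun p => p != -1)
  let insert_at : Int := (PySem.List.min? positions (fun x => x)).getD (PySem.Chars.len s)
  let head := PySem.Chars.rstrip (PySem.List.slice s none (some insert_at))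
  let tail := PySem.List.slice s (some insert_at) none
  let head := if PySem.Chars.endswith head [';'] then
      PySem.Chars.rstrip (PySem.List.slice head none (some (-1)))
    else head
  String.ofList (head ++ ' ' :: fragment.toList ++ tail)

-- ===== PORT B =====
-- the four keywords (lowercase), as in Source B's tuple
def pvKws : List (List Char) :=
  [" group by ".toList, " order by ".toList, " having ".toList, " limit ".toList]

-- any(lower.startswith(k, i) for k in keywords), with the suffix lower[i:] passed directly
def pvHit (s : List Char) : Bool := pvKws.any (fun k => k.isPrefixOf s)

-- Source B's while loop: advance i until a keyword starts at i or the string ends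
def pvScan : List Char → Nat
  | [] => 0
  | c :: rest => if pvHit (c :: rest) then 0 else pvScan rest + 1

def insert_before_tail_py_alt (sql : String) (fragment : String) : String :=
  let s := sql.toList
  let i := pvScan (PySem.Chars.lower s)
  let head := PySem.Chars.rstrip (s.take i)
  let tail := s.drop i
  let head := if PySem.Chars.endswith head [';'] then
      PySem.Chars.rstrip head.dropLast
    else head
  String.ofList (head ++ ' ' :: fragment.toList ++ tail)

-- ===== PRECONDITION & SPEC =====
def Spec_insert_before_tail_py (sql : String) (fragment : String) (out : String) : Prop := out = insert_before_tail_py_alt sql fragment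
instance (sql : String) (fragment : String) (out : String) : Decidable (Spec_insert_before_tail_py sql fragment out) := by unfold Spec_insert_before_tail_py; infer_instance

-- ===== CLAIM (what is proved, stated in full; the proofs are below) =====
def Claim_equal_insert_before_tail_py : Prop := ∀ (sql : String) (fragment : String), Dom_insert_before_tail_py sql fragment → Spec_insert_before_tail_py sql fragment (insert_before_tail_py sql fragment)

-- ===== LEMMAS AND PROOFS =====

theorem pvScan_le (L : List Char) : pvScan L ≤ L.length := by
  induction L with
  | nil => simp [pvScan]
  | cons c rest ih =>
      simp only [pvScan]
      split
      · simp
      · simpa using ih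

theorem pvScan_not_hit (L : List Char) (j : Nat) (h : j < pvScan L) :
    pvHit (L.drop j) = false := by
  induction L generalizing j with
  | nil => simp [pvScan] at h
  | cons c rest ih =>
      simp only [pvScan] at h
      split at h
      · omega
      · cases j with
        | zero => simpa using ‹¬ pvHit (c :: rest) = true›
        | succ j' => exact ih j' (by omega)

theorem pvScan_hit (L : List Char) (h : pvScan L < L.length) :
    pvHit (L.drop (pvScan L)) = true := by
  induction L with
  | nil => simp at h
  | cons c rest ih =>
      simp only [pvScan] at h ⊢
      by_cases hb : pvHit (c :: rest) = true
      · simp [hb]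
      · simp only [hb] at h ⊢
        simpa using ih (by simp at h; omega)

theorem pvHit_iff (s : List Char) : pvHit s = true ↔ ∃ k ∈ pvKws, k <+: s := by
  simp [pvHit, List.any_eq_true, List.isPrefixOf_iff_prefix]

-- if no keyword occurs anywhere, the scan runs to the end
theorem pvScan_eq_length (L : List Char) (h : ∀ j, pvHit (L.drop j) = false) :
    pvScan L = L.length := by
  rcases Nat.lt_or_ge (pvScan L) L.length with hlt | hge
  · have := pvScan_hit L hlt
    rw [h (pvScan L)] at this; cases this
  · exact Nat.le_antisymm (pvScan_le L) hge

-- the core fact: A's insert position equals B's scan result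
theorem min_eq_scan (L : List Char) :
    ((PySem.List.min? (([PySem.Chars.find L " group by ".toList,
        PySem.Chars.find L " order by ".toList,
        PySem.Chars.find L " having ".toList,
        PySem.Chars.find L " limit ".toList].filter (fun p => p != -1))) (fun x => x)).getD
        (L.length : Int)) = ((pvScan L : Nat) : Int) := by
  set ps := ([PySem.Chars.find L " group by ".toList,
        PySem.Chars.find L " order by ".toList,
        PySem.Chars.find L " having ".toList,
        PySem.Chars.find L " limit ".toList].filter (fun p => p != -1)) with hps
  -- every member of ps is the find of one of the keywords, and is ≠ -1
  have hmem : ∀ p ∈ ps, (∃ k ∈ pvKws, p = PySem.Chars.find L k) ∧ p ≠ -1 := by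
    intro p hp
    rw [hps, List.mem_filter] at hp
    rcases hp with ⟨hp, hne⟩
    refine ⟨?_, by simpa using hne⟩
    simp only [List.mem_cons, List.not_mem_nil, or_false] at hp
    rcases hp with h | h | h | h <;>
      exact ⟨_, by simp [pvKws], h⟩
  -- every keyword's non-(-1) find is in ps
  have hin : ∀ k ∈ pvKws, PySem.Chars.find L k ≠ -1 → PySem.Chars.find L k ∈ ps := by
    intro k hk hne
    rw [hps, List.mem_filter]
    constructor
    · simp only [pvKws, List.mem_cons, List.not_mem_nil, or_false] at hk
      rcases hk with h | h | h | h <;> subst h <;> simp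
    · simpa using hne
  cases hmin : PySem.List.min? ps (fun x => x) with
  | none =>
      -- no keyword occurs: each find is -1
      have hnil : ps = [] := (PySem.List.min?_eq_none_iff ps _).mp hmin
      have hnohit : ∀ j, pvHit (L.drop j) = false := by
        intro j
        by_contra hcon
        have hhit : pvHit (L.drop j) = true := by
          cases hb : pvHit (L.drop j) with
          | false => exact absurd hb hcon
          | true => rfl
        rcases (pvHit_iff _).mp hhit with ⟨k, hk, hpre⟩
        have hinf : PySem.Chars.isIn k L = true :=
          (PySem.Chars.exists_prefix_drop_iff_isIn k L).mp ⟨j, hpre⟩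
        have hne : PySem.Chars.find L k ≠ -1 := by
          rw [Ne, PySem.Chars.find_eq_neg_one_iff]
          simpa [PySem.Chars.isIn_iff_infix] using hinf
        have := hin k hk hne
        rw [hnil] at this; simp at this
      simp [pvScan_eq_length L hnohit]
  | some m =>
      rcases hmem m (PySem.List.min?_mem hmin) with ⟨⟨k, hk, hmk⟩, hmne⟩
      have hm0 : 0 ≤ m := by
        have := PySem.Chars.neg_one_le_find L k
        rw [← hmk] at this; omega
      have hfind0 : 0 ≤ PySem.Chars.find L k := by rw [← hmk]; exact hm0
      rcases PySem.Chars.find_spec hfind0 with ⟨hpre, hminl⟩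
      rw [← hmk] at hpre hminl
      -- keyword k is a hit at m.toNat, and m.toNat < L.length
      have hhitm : pvHit (L.drop m.toNat) = true :=
        (pvHit_iff _).mpr ⟨k, hk, hpre⟩
      have hklen : k ≠ [] := by
        simp only [pvKws, List.mem_cons, List.not_mem_nil, or_false] at hk
        rcases hk with h | h | h | h <;> subst h <;> decide
      have hmlt : m.toNat < L.length := by
        by_contra hge
        have : L.drop m.toNat = [] := List.drop_eq_nil_of_le (by omega)
        rw [this] at hpre
        exact hklen (List.prefix_nil.mp hpre)
      -- pvScan L ≤ m.toNat
      have hle1 : pvScan L ≤ m.toNat := by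
        by_contra hgt
        have := pvScan_not_hit L m.toNat (by omega)
        rw [hhitm] at this; cases this
      -- m.toNat ≤ pvScan L
      have hle2 : m.toNat ≤ pvScan L := by
        by_contra hgt
        have hslt : pvScan L < L.length := by omega
        rcases (pvHit_iff _).mp (pvScan_hit L hslt) with ⟨k', hk', hpre'⟩
        have hinf' : PySem.Chars.isIn k' L = true :=
          (PySem.Chars.exists_prefix_drop_iff_isIn k' L).mp ⟨pvScan L, hpre'⟩
        have hne' : PySem.Chars.find L k' ≠ -1 := by
          rw [Ne, PySem.Chars.find_eq_neg_one_iff]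
          simpa [PySem.Chars.isIn_iff_infix] using hinf'
        have hf0' : 0 ≤ PySem.Chars.find L k' := by
          have := PySem.Chars.neg_one_le_find L k'; omega
        rcases PySem.Chars.find_spec hf0' with ⟨_, hminl'⟩
        -- find L k' ≤ pvScan L since k' is a prefix at pvScan L
        have hfle : (PySem.Chars.find L k').toNat ≤ pvScan L := by
          by_contra hc
          exact hminl' (pvScan L) (by omega) hpre'
        have hmle : m ≤ PySem.Chars.find L k' :=
          PySem.List.min?_isMin hmin _ (hin k' hk' hne')
        omega
      have : m.toNat = pvScan L := Nat.le_antisymm hle2 hle1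
      simp [← this, hm0]

theorem length_lower (s : List Char) : (PySem.Chars.lower s).length = s.length := by
  simp [PySem.Chars.lower]

-- ===== VERDICT (by name: the statement is the Claim_ definition above) =====
theorem insert_before_tail_py_spec : Claim_equal_insert_before_tail_py := by
  intro sql fragment _
  unfold Spec_insert_before_tail_py insert_before_tail_py insert_before_tail_py_alt
  simp only []
  have hmin := min_eq_scan (PySem.Chars.lower sql.toList)
  rw [length_lower] at hmin
  rw [show PySem.Chars.len sql.toList = (sql.toList.length : Int) by simp [PySem.Chars.len_eq]]
  rw [hmin]
  rw [PySem.List.slice_to_natCast, PySem.List.slice_from_natCast, PySem.List.slice_to_neg_one]
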